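-- pv_equiv track=rewrite | github.com/yoshihikohayashi/wic_llm | get_tword_vectors.py | get_csent_spans
-- ===== SOURCE A (Python) =====
-- def get_csent_spans(token_ids):
--     c1_sep_start = 2; c1_sep_end = 3
--     c2_sep_start = 3; c2_sep_end = 4
--     c1_span = []
--     c2_span = []
--     sep_c = 0
--     in_c1_span = False
--     in_c2_span = False
--     for i, id in enumerate(token_ids):
--         if id==102:
--             sep_c += 1
--         if sep_c==c1_sep_start:
--             in_c1_span = True
--         if sep_c==c2_sep_start:
--             in_c2_span = True
--         if in_c1_span:
--             c1_span.append(i)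
--         if in_c2_span:
--             c2_span.append(i)
--         if sep_c==c1_sep_end:
--             in_c1_span = False
--             continue
--         if sep_c==c2_sep_end:
--             break
--     return c1_span[1:-1], c2_span[1:-1]
-- ===== SOURCE B (Python) =====
-- def _first_sep(ts):
--     for j, t in enumerate(ts):
--         if t == 102:
--             return j
--     return None
--
-- def get_csent_spans(token_ids):
--     # Locate the separators directly and build the spans as closed-form ranges,
--     # instead of A's flag/counter state machine.
--     n = len(token_ids)
--     j1 = _first_sep(token_ids)
--     if j1 is None:
--         return [], []
--     j2 = _first_sep(token_ids[j1 + 1:])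
--     if j2 is None:
--         return [], []
--     s2 = j1 + 1 + j2
--     j3 = _first_sep(token_ids[s2 + 1:])
--     s3 = None if j3 is None else s2 + 1 + j3
--     c1 = list(range(s2 + 1, s3 if s3 is not None else n - 1))
--     if s3 is None:
--         return c1, []
--     j4 = _first_sep(token_ids[s3 + 1:])
--     s4 = None if j4 is None else s3 + 1 + j4
--     c2 = list(range(s3 + 1, s4 if s4 is not None else n - 1))
--     return c1, c2
-- ===== Notes on version B (the rewrite author's own statement) =====
-- stated objective: simpler
-- what changed: Replaced the flag/counter state machine (sep_c, in_c1_span, in_c2_span, continue/break) by directly locating the 2nd/3rd/4th separator positions and emitting each span as a closed-form range between them.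
import Mathlib
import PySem

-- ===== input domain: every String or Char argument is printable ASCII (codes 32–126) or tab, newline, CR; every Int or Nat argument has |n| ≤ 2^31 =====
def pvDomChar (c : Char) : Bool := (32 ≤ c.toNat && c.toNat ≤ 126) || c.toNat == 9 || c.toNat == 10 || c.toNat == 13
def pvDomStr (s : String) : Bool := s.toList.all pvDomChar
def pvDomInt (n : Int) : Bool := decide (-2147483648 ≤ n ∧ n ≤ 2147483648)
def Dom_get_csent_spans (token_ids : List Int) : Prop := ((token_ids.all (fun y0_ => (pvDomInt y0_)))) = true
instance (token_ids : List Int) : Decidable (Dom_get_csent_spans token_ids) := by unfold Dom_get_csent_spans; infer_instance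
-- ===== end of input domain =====

-- B replaces A's flag/counter state machine by locating the separator positions
-- and emitting each span as a closed-form range (objective: simpler).

-- B replaces A's flag/counter/continue/break state machine by locating the separator
-- positions directly and emitting each span as a closed-form range (objective: simpler).

-- B replaces A's flag/counter/continue/break state machine by locating the separator
-- positions directly and emitting each span as a closed-form range (objective: simpler).

-- ===== PORT A =====
-- A's for-loop: state (i, c1_span, c2_span, sep_c, in_c1_span, in_c2_span);
-- 'continue' = tail call, 'break' = early return
def loopA : List Int → Int → List Int → List Int → Int → Bool → Bool → List Int × List Int
  | [], _i, c1, c2, _sep, _in1, _in2 => (c1, c2)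
  | id :: rest, i, c1, c2, sep, in1, in2 =>
    let sep' := if id = 102 then sep + 1 else sep
    let in1' := if sep' = 2 then true else in1
    let in2' := if sep' = 3 then true else in2
    let c1' := if in1' then c1 ++ [i] else c1
    let c2' := if in2' then c2 ++ [i] else c2
    if sep' = 3 then loopA rest (i + 1) c1' c2' sep' false in2'
    else if sep' = 4 then (c1', c2')
    else loopA rest (i + 1) c1' c2' sep' in1' in2'

def get_csent_spans (token_ids : List Int) : List Int × List Int :=
  let r := loopA token_ids 0 [] [] 0 false false
  (PySem.List.slice r.1 (some 1) (some (-1)), PySem.List.slice r.2 (some 1) (some (-1)))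

-- ===== PORT B =====
-- _first_sep: index of the first 102, None if absent
def firstSep : List Int → Option Nat
  | [] => none
  | t :: rest => if t = 102 then some 0 else (firstSep rest).map (· + 1)

-- Python's ts[k:] for 0 ≤ k is exactly List.drop k here (every start below is a nonnegative int)
def get_csent_spans_alt (token_ids : List Int) : List Int × List Int :=
  let n : Int := token_ids.length
  match firstSep token_ids with
  | none => ([], [])
  | some j1 =>
    match firstSep (token_ids.drop (j1 + 1)) with
    | none => ([], [])
    | some j2 =>
      let s2 : Nat := j1 + 1 + j2
      match firstSep (token_ids.drop (s2 + 1)) with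
      | none => (PySem.List.pyRange ((s2 : Int) + 1) (n - 1) 1, [])
      | some j3 =>
        let s3 : Nat := s2 + 1 + j3
        let c1 := PySem.List.pyRange ((s2 : Int) + 1) (s3 : Int) 1
        match firstSep (token_ids.drop (s3 + 1)) with
        | none => (c1, PySem.List.pyRange ((s3 : Int) + 1) (n - 1) 1)
        | some j4 => (c1, PySem.List.pyRange ((s3 : Int) + 1) ((s3 : Int) + 1 + (j4 : Int)) 1)

-- ===== PRECONDITION & SPEC =====
def Spec_get_csent_spans (token_ids : List Int) (out : List Int × List Int) : Prop := out = get_csent_spans_alt token_ids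
instance (token_ids : List Int) (out : List Int × List Int) : Decidable (Spec_get_csent_spans token_ids out) := by unfold Spec_get_csent_spans; infer_instance

-- ===== CLAIM (what is proved, stated in full; the proofs are below) =====
def Claim_equal_get_csent_spans : Prop := ∀ (token_ids : List Int), Dom_get_csent_spans token_ids → Spec_get_csent_spans token_ids (get_csent_spans token_ids)

-- ===== LEMMAS AND PROOFS =====

theorem firstSep_lt {xs : List Int} {j : Nat} (h : firstSep xs = some j) : j < xs.length := by
  induction xs generalizing j with
  | nil => simp [firstSep] at h
  | cons t rest ih =>
    simp only [firstSep] at h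
    by_cases ht : t = 102
    · simp [ht] at h; simp only [List.length_cons]; omega
    · simp [ht] at h
      obtain ⟨k, hk, rfl⟩ := h
      simpa using Nat.succ_lt_succ (ih hk)

theorem tail_pyRange (a b : Int) : (PySem.List.pyRange a b 1).tail = PySem.List.pyRange (a + 1) b 1 := by
  by_cases h : a < b
  · rw [PySem.List.pyRange_one_cons h]; rfl
  · rw [PySem.List.pyRange_one_eq_nil (by omega), PySem.List.pyRange_one_eq_nil (by omega)]; rfl

theorem dropLast_pyRange (a b : Int) : (PySem.List.pyRange a b 1).dropLast = PySem.List.pyRange a (b - 1) 1 := by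
  by_cases h : a < b
  · have hb : b = (b - 1) + 1 := by omega
    rw [hb, PySem.List.pyRange_one_succ_right (by omega)]
    simp
  · rw [PySem.List.pyRange_one_eq_nil (by omega), PySem.List.pyRange_one_eq_nil (by omega)]; rfl

theorem slice_one_neg_one {α : Type} (xs : List α) :
    PySem.List.slice xs (some 1) (some (-1)) = xs.tail.dropLast := by
  simp [PySem.List.slice, PySem.List.clampIdx]
  rcases xs with _ | ⟨x, xs⟩
  · rfl
  · simp [List.dropLast_eq_take, List.tail]

theorem trim_pyRange (a b : Int) :
    PySem.List.slice (PySem.List.pyRange a b 1) (some 1) (some (-1)) = PySem.List.pyRange (a + 1) (b - 1) 1 := by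
  rw [slice_one_neg_one, tail_pyRange, dropLast_pyRange]

theorem L3 (xs : List Int) : ∀ (i : Int) (c1 c2 : List Int),
    loopA xs i c1 c2 3 false true =
      (c1, c2 ++ (match firstSep xs with
        | none => PySem.List.pyRange i (i + xs.length) 1
        | some j => PySem.List.pyRange i (i + (j : Int) + 1) 1)) := by
  induction xs with
  | nil => intro i c1 c2; simp [loopA, firstSep, PySem.List.pyRange_one_eq_nil]
  | cons t rest ih =>
    intro i c1 c2
    by_cases ht : t = 102
    · simp [loopA, firstSep, ht, PySem.List.pyRange_one_singleton]
    · simp only [loopA, firstSep, ht]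
      norm_num
      rw [ih (i + 1) c1 (c2 ++ [i])]
      rcases hfs : firstSep rest with _ | j <;> simp
      · rw [show i + ((rest.length : Int) + 1) = i + 1 + (rest.length : Int) by ring,
            ← PySem.List.pyRange_one_cons (by omega)]
      · rw [show i + ((j : Int) + 1) + 1 = i + 1 + (j : Int) + 1 by ring,
            ← PySem.List.pyRange_one_cons (by omega)]

theorem L2 (xs : List Int) : ∀ (i : Int) (c1 : List Int),
    loopA xs i c1 [] 2 true false =
      (match firstSep xs with
        | none => (c1 ++ PySem.List.pyRange i (i + xs.length) 1, [])
        | some j => loopA (xs.drop (j + 1)) (i + (j : Int) + 1) (c1 ++ PySem.List.pyRange i (i + (j : Int) + 1) 1) [i + (j : Int)] 3 false true) := by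
  induction xs with
  | nil => intro i c1; simp [loopA, firstSep, PySem.List.pyRange_one_eq_nil]
  | cons t rest ih =>
    intro i c1
    by_cases ht : t = 102
    · simp [loopA, firstSep, ht, PySem.List.pyRange_one_singleton]
    · simp only [loopA, firstSep, ht]
      norm_num
      rw [ih (i + 1) (c1 ++ [i])]
      rcases hfs : firstSep rest with _ | j <;> simp
      · rw [show i + ((rest.length : Int) + 1) = i + 1 + (rest.length : Int) by ring,
            ← PySem.List.pyRange_one_cons (by omega)]
      · rw [show i + ((j : Int) + 1) + 1 = i + 1 + (j : Int) + 1 by ring,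
            show i + ((j : Int) + 1) = i + 1 + (j : Int) by ring,
            PySem.List.pyRange_one_cons (show i < i + 1 + (j : Int) + 1 by omega)]

theorem L1 (xs : List Int) : ∀ (i : Int),
    loopA xs i [] [] 1 false false =
      (match firstSep xs with
        | none => ([], [])
        | some j => loopA (xs.drop (j + 1)) (i + (j : Int) + 1) [i + (j : Int)] [] 2 true false) := by
  induction xs with
  | nil => intro i; simp [loopA, firstSep]
  | cons t rest ih =>
    intro i
    by_cases ht : t = 102
    · simp [loopA, firstSep, ht]
    · simp only [loopA, firstSep, ht]
      norm_num
      rw [ih (i + 1)]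
      rcases hfs : firstSep rest with _ | j <;> simp
      rw [show i + ((j : Int) + 1) + 1 = i + 1 + (j : Int) + 1 by ring,
          show i + ((j : Int) + 1) = i + 1 + (j : Int) by ring]

theorem L0 (xs : List Int) : ∀ (i : Int),
    loopA xs i [] [] 0 false false =
      (match firstSep xs with
        | none => ([], [])
        | some j => loopA (xs.drop (j + 1)) (i + (j : Int) + 1) [] [] 1 false false) := by
  induction xs with
  | nil => intro i; simp [loopA, firstSep]
  | cons t rest ih =>
    intro i
    by_cases ht : t = 102
    · simp [loopA, firstSep, ht]
    · simp only [loopA, firstSep, ht]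
      norm_num
      rw [ih (i + 1)]
      rcases hfs : firstSep rest with _ | j <;> simp
      rw [show i + ((j : Int) + 1) + 1 = i + 1 + (j : Int) + 1 by ring]

-- A equals B: chain the phase lemmas L0/L1/L2/L3 and trim the resulting ranges
theorem A_eq_B (xs : List Int) : get_csent_spans xs = get_csent_spans_alt xs := by
  simp only [get_csent_spans, get_csent_spans_alt]
  rw [L0 xs 0]
  rcases h1 : firstSep xs with _ | j1
  · simp [PySem.List.slice]
  · dsimp only
    have hj1 : j1 < xs.length := firstSep_lt h1
    rw [L1]
    rcases h2 : firstSep (xs.drop (j1 + 1)) with _ | j2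
    · simp [PySem.List.slice]
    · dsimp only
      have hj2 : j2 < (xs.drop (j1 + 1)).length := firstSep_lt h2
      simp only [List.length_drop] at hj2
      rw [L2, List.drop_drop, show j1 + 1 + (j2 + 1) = j1 + 1 + j2 + 1 by omega]
      rcases h3 : firstSep (List.drop (j1 + 1 + j2 + 1) xs) with _ | j3
      · dsimp only
        simp only [List.singleton_append, List.length_drop]
        rw [← PySem.List.pyRange_one_cons (by omega), trim_pyRange]
        simp only [Prod.mk.injEq]
        refine ⟨by congr 1 <;> push_cast <;> omega, by simp [slice_one_neg_one]⟩
      · dsimp only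
        have hj3 := firstSep_lt h3
        simp only [List.length_drop] at hj3
        rw [L3, List.drop_drop, show j1 + 1 + j2 + 1 + (j3 + 1) = j1 + 1 + j2 + 1 + j3 + 1 by omega]
        rcases h4 : firstSep (List.drop (j1 + 1 + j2 + 1 + j3 + 1) xs) with _ | j4
        · dsimp only
          simp only [List.singleton_append, List.length_drop]
          rw [← PySem.List.pyRange_one_cons (by omega), ← PySem.List.pyRange_one_cons (by omega),
              trim_pyRange, trim_pyRange]
          simp only [Prod.mk.injEq]
          constructor <;> (congr 1 <;> push_cast <;> omega)
        · dsimp only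
          simp only [List.singleton_append]
          rw [← PySem.List.pyRange_one_cons (by omega), ← PySem.List.pyRange_one_cons (by omega),
              trim_pyRange, trim_pyRange]
          simp only [Prod.mk.injEq]
          constructor <;> (congr 1 <;> push_cast <;> omega)

-- ===== VERDICT (by name: the statement is the Claim_ definition above) =====
theorem get_csent_spans_spec : Claim_equal_get_csent_spans := by
  intro xs _hdom
  unfold Spec_get_csent_spans
  exact A_eq_B xs
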